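-- pv_equiv track=rewrite | github.com/fadedwind/Bade03--Game | chart_patterns.py | basic_strike
-- ===== SOURCE A (Python) =====
-- def basic_strike(pos,line,point,special = ''):
--     multi_line_pattern = ''
--     info = []
--     for i in range(1,5):
--         if i==line:
--             multi_line_pattern += 'N'
--             info.append('%d/%s'%(point,special))
--         else:
--             multi_line_pattern += '_'
--             info.append('')
--
--     return write_multi_tiles(multi_line_pattern, pos, info)
--
-- def write_multi_tiles(pattern, beat_pos,info):
--     multi_tile_info = "%s,%d"%(pattern,beat_pos)
--
--     for i in range(4):
--         tile_data = ','
--         tile_info = info[i].split('/')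
--
--         if pattern[i]=='_':
--             pass
--         elif pattern[i]=='N':
--             if len(tile_info) == 1:
--                 info[i] += '/'
--             tile_data += info[i]
--         elif pattern[i]=='H':
--             if len(tile_info) == 2:
--                 info[i] += '/'
--             tile_data += info[i]
--         else:
--             raise ValueError("Invalid pattern given!")
--
--         multi_tile_info += tile_data
--
--     return multi_tile_info+'\n'
-- ===== SOURCE B (Python) =====
-- def basic_strike(pos, line, point, special=''):
--     # Closed form: at most one of the four tiles (line in 1..4) carries data.
--     if 1 <= line <= 4:
--         k = line - 1
--         pattern = '_' * k + 'N' + '_' * (3 - k)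
--         tiles = ',' * k + ',%d/%s' % (point, special) + ',' * (3 - k)
--     else:
--         pattern = '____'
--         tiles = ',,,,'
--     return '%s,%d%s\n' % (pattern, pos, tiles)
-- ===== Notes on version B (the rewrite author's own statement) =====
-- stated objective: simpler
-- what changed: Replaced the build-then-reparse pipeline (loop building an info list, then write_multi_tiles re-splitting each field on '/' with dead 'H'/error branches) by a closed-form string construction: the single 'N' position is line-1 when 1<=line<=4, so pattern and tile fields are built directly by repetition and one format, no loops and no helper.
import Mathlib
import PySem

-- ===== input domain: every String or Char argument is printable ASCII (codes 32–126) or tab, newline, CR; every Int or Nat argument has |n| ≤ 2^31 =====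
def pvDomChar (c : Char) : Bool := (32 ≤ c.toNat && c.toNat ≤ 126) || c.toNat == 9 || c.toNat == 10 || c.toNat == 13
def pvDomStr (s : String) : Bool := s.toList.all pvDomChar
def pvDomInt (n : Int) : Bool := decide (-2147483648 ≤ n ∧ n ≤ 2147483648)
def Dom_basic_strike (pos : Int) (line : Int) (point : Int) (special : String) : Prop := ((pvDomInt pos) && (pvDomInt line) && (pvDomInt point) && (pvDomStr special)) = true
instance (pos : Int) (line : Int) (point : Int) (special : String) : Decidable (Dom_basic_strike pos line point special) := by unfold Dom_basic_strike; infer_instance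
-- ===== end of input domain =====

-- B replaces A's build-then-reparse pipeline (loop + write_multi_tiles re-splitting each
-- field on '/') by a closed-form construction of the single-'N' pattern and tile fields
-- (objective: simpler).

-- ===== PORT A =====
-- one iteration of write_multi_tiles' `for i in range(4)` loop; state = (multi_tile_info, info)
-- (`info[i]` via pyGet?; the `.getD ""` / fall-through arms mark Python's IndexError /
--  `raise ValueError`, which are unreachable in A's only call: pattern has exactly 4 chars
--  '_'/'N' and info has 4 elements)
def wmt_step (pattern : String) (st : String × List String) (i : Int) : String × List String :=
  let infoi := (PySem.List.pyGet? st.2 i).getD ""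
  let tile_info := (PySem.Str.split? infoi "/").getD []
  match PySem.Str.pyGet? pattern i with
  | some '_' => (st.1 ++ ",", st.2)
  | some 'N' =>
    let info2 := if tile_info.length == 1 then st.2.set i.toNat (infoi ++ "/") else st.2
    (st.1 ++ ("," ++ (PySem.List.pyGet? info2 i).getD ""), info2)
  | some 'H' =>
    let info2 := if tile_info.length == 2 then st.2.set i.toNat (infoi ++ "/") else st.2
    (st.1 ++ ("," ++ (PySem.List.pyGet? info2 i).getD ""), info2)
  | _ => (st.1, st.2)

def write_multi_tiles (pattern : String) (beat_pos : Int) (info : List String) : String :=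
  (((PySem.List.pyRange 0 4 1).foldl (wmt_step pattern)
    (pattern ++ "," ++ PySem.Int.toStr beat_pos, info)).1) ++ "\n"

def basic_strike (pos : Int) (line : Int) (point : Int) (special : String) : String :=
  let st := (PySem.List.pyRange 1 5 1).foldl
    (fun (st : String × List String) i =>
      if i == line then (st.1 ++ "N", st.2 ++ [PySem.Int.toStr point ++ "/" ++ special])
      else (st.1 ++ "_", st.2 ++ [""]))
    ("", [])
  write_multi_tiles st.1 pos st.2

-- ===== PORT B =====
def basic_strike_alt (pos : Int) (line : Int) (point : Int) (special : String) : String :=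
  if 1 ≤ line ∧ line ≤ 4 then
    let k := (line - 1).toNat
    let pattern := String.ofList (List.replicate k '_') ++ "N" ++ String.ofList (List.replicate (3-k) '_')
    let tiles := String.ofList (List.replicate k ',') ++ ("," ++ PySem.Int.toStr point ++ "/" ++ special) ++ String.ofList (List.replicate (3-k) ',')
    pattern ++ "," ++ PySem.Int.toStr pos ++ tiles ++ "\n"
  else
    "____," ++ PySem.Int.toStr pos ++ ",,,,\n"

-- ===== PRECONDITION & SPEC =====
def Spec_basic_strike (pos : Int) (line : Int) (point : Int) (special : String) (out : String) : Prop := out = basic_strike_alt pos line point special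
instance (pos : Int) (line : Int) (point : Int) (special : String) (out : String) : Decidable (Spec_basic_strike pos line point special out) := by unfold Spec_basic_strike; infer_instance

-- ===== CLAIM (what is proved, stated in full; the proofs are below) =====
def Claim_equal_basic_strike : Prop := ∀ (pos : Int) (line : Int) (point : Int) (special : String), Dom_basic_strike pos line point special → Spec_basic_strike pos line point special (basic_strike pos line point special)

-- ===== LEMMAS AND PROOFS =====

-- splitOn.go returns at least one more piece than the accumulator holds
theorem go_ge (sep : List Char) (fuel : Nat) (l cur : List Char) (acc : List (List Char)) :
    acc.length + 1 ≤ (PySem.Chars.splitOn.go sep fuel l cur acc).length := by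
  induction fuel generalizing l cur acc with
  | zero => simp [PySem.Chars.splitOn.go]
  | succ n ih =>
    cases l with
    | nil => simp [PySem.Chars.splitOn.go]
    | cons c rest =>
      rw [PySem.Chars.splitOn.go]
      by_cases h : sep.isPrefixOf (c :: rest)
      · simp only [h, if_true]
        have := ih (List.drop sep.length (c :: rest)) [] (cur.reverse :: acc)
        simp at this; omega
      · simp only [h]
        exact le_trans (by omega) (ih rest (c :: cur) acc)

-- with enough fuel, a remaining '/' forces at least two more pieces
theorem go_two (fuel : Nat) (l cur : List Char) (acc : List (List Char))
    (hm : '/' ∈ l) (hf : l.length ≤ fuel) :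
    acc.length + 2 ≤ (PySem.Chars.splitOn.go ['/'] fuel l cur acc).length := by
  induction fuel generalizing l cur acc with
  | zero => cases l with
    | nil => simp at hm
    | cons c rest => simp at hf
  | succ n ih =>
    cases l with
    | nil => simp at hm
    | cons c rest =>
      rw [PySem.Chars.splitOn.go]
      by_cases h : (['/'] : List Char).isPrefixOf (c :: rest)
      · simp only [h, if_true]
        have := go_ge ['/'] n (List.drop (['/'] : List Char).length (c :: rest)) [] (cur.reverse :: acc)
        simp at this ⊢; omega
      · simp only [h]
        have hc : c ≠ '/' := by
          intro hc; apply h; simp [hc, List.isPrefixOf]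
        have hm' : '/' ∈ rest := by
          rcases List.mem_cons.mp hm with h1 | h1
          · exact absurd h1.symm hc
          · exact h1
        exact ih rest (c :: cur) acc hm' (by simpa using Nat.le_of_succ_le_succ (by simpa using hf))

-- a string containing '/' never splits on "/" into exactly one piece
theorem split_ne_one (s : String) (h : '/' ∈ s.toList) :
    ((((PySem.Str.split? s "/").getD []).length == 1) = false) := by
  have hs : PySem.Str.split? s "/" = some (List.map String.ofList (PySem.Chars.splitOn s.toList ['/'])) := by
    simp [PySem.Str.split?, PySem.Chars.split?]
  rw [hs]
  simp only [Option.getD_some, List.length_map]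
  have h2 : 2 ≤ (PySem.Chars.splitOn s.toList ['/']).length := by
    unfold PySem.Chars.splitOn
    have := go_two (s.toList.length + 1) s.toList [] [] h (by omega)
    simpa using this
  simp only [beq_eq_false_iff_ne, ne_eq]
  omega

-- A's first loop, evaluated at each line value (the skeleton is closed, so rfl)
theorem hstep1 (pos point : Int) (special : String) :
    basic_strike pos 1 point special
      = write_multi_tiles "N___" pos [PySem.Int.toStr point ++ "/" ++ special, "", "", ""] := rfl
theorem hstep2 (pos point : Int) (special : String) :
    basic_strike pos 2 point special
      = write_multi_tiles "_N__" pos ["", PySem.Int.toStr point ++ "/" ++ special, "", ""] := rfl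
theorem hstep3 (pos point : Int) (special : String) :
    basic_strike pos 3 point special
      = write_multi_tiles "__N_" pos ["", "", PySem.Int.toStr point ++ "/" ++ special, ""] := rfl
theorem hstep4 (pos point : Int) (special : String) :
    basic_strike pos 4 point special
      = write_multi_tiles "___N" pos ["", "", "", PySem.Int.toStr point ++ "/" ++ special] := rfl

-- the 'N' iteration of write_multi_tiles' loop, given the split has ≠ 1 pieces
theorem tN1 (m x : String) (hx : ((((PySem.Str.split? x "/").getD []).length == 1) = false)) :
    wmt_step "N___" (m, [x,"","",""]) 0 = (m ++ ("," ++ x), [x,"","",""]) := by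
  simp [wmt_step, PySem.List.pyGet?, PySem.List.pyIdx?, hx]
theorem tN2 (m x : String) (hx : ((((PySem.Str.split? x "/").getD []).length == 1) = false)) :
    wmt_step "_N__" (m, ["",x,"",""]) 1 = (m ++ ("," ++ x), ["",x,"",""]) := by
  simp [wmt_step, PySem.List.pyGet?, PySem.List.pyIdx?, hx]
theorem tN3 (m x : String) (hx : ((((PySem.Str.split? x "/").getD []).length == 1) = false)) :
    wmt_step "__N_" (m, ["","",x,""]) 2 = (m ++ ("," ++ x), ["","",x,""]) := by
  simp [wmt_step, PySem.List.pyGet?, PySem.List.pyIdx?, hx]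
theorem tN4 (m x : String) (hx : ((((PySem.Str.split? x "/").getD []).length == 1) = false)) :
    wmt_step "___N" (m, ["","","",x]) 3 = (m ++ ("," ++ x), ["","","",x]) := by
  simp [wmt_step, PySem.List.pyGet?, PySem.List.pyIdx?, hx]

theorem case1 (pos point : Int) (special : String)
    (hx : ((((PySem.Str.split? (PySem.Int.toStr point ++ "/" ++ special) "/").getD []).length == 1) = false)) :
    basic_strike pos 1 point special = basic_strike_alt pos 1 point special := by
  have r0 : PySem.List.pyRange 0 4 1 = [0,1,2,3] := by decide
  rw [hstep1]; unfold write_multi_tiles; rw [r0]; simp only [List.foldl]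
  rw [tN1 _ _ hx]
  rw [show ∀ (m x : String), wmt_step "N___" (m,[x,"","",""]) 1 = (m ++ ",", [x,"","",""]) from fun _ _ => rfl]
  rw [show ∀ (m x : String), wmt_step "N___" (m,[x,"","",""]) 2 = (m ++ ",", [x,"","",""]) from fun _ _ => rfl]
  rw [show ∀ (m x : String), wmt_step "N___" (m,[x,"","",""]) 3 = (m ++ ",", [x,"","",""]) from fun _ _ => rfl]
  unfold basic_strike_alt
  norm_num
  refine String.toList_inj.mp ?_
  simp [String.toList_append]

theorem case2 (pos point : Int) (special : String)
    (hx : ((((PySem.Str.split? (PySem.Int.toStr point ++ "/" ++ special) "/").getD []).length == 1) = false)) :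
    basic_strike pos 2 point special = basic_strike_alt pos 2 point special := by
  have r0 : PySem.List.pyRange 0 4 1 = [0,1,2,3] := by decide
  rw [hstep2]; unfold write_multi_tiles; rw [r0]; simp only [List.foldl]
  rw [show ∀ (m x : String), wmt_step "_N__" (m,["",x,"",""]) 0 = (m ++ ",", ["",x,"",""]) from fun _ _ => rfl]
  rw [tN2 _ _ hx]
  rw [show ∀ (m x : String), wmt_step "_N__" (m,["",x,"",""]) 2 = (m ++ ",", ["",x,"",""]) from fun _ _ => rfl]
  rw [show ∀ (m x : String), wmt_step "_N__" (m,["",x,"",""]) 3 = (m ++ ",", ["",x,"",""]) from fun _ _ => rfl]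
  unfold basic_strike_alt
  norm_num
  refine String.toList_inj.mp ?_
  simp [String.toList_append]

theorem case3 (pos point : Int) (special : String)
    (hx : ((((PySem.Str.split? (PySem.Int.toStr point ++ "/" ++ special) "/").getD []).length == 1) = false)) :
    basic_strike pos 3 point special = basic_strike_alt pos 3 point special := by
  have r0 : PySem.List.pyRange 0 4 1 = [0,1,2,3] := by decide
  rw [hstep3]; unfold write_multi_tiles; rw [r0]; simp only [List.foldl]
  rw [show ∀ (m x : String), wmt_step "__N_" (m,["","",x,""]) 0 = (m ++ ",", ["","",x,""]) from fun _ _ => rfl]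
  rw [show ∀ (m x : String), wmt_step "__N_" (m,["","",x,""]) 1 = (m ++ ",", ["","",x,""]) from fun _ _ => rfl]
  rw [tN3 _ _ hx]
  rw [show ∀ (m x : String), wmt_step "__N_" (m,["","",x,""]) 3 = (m ++ ",", ["","",x,""]) from fun _ _ => rfl]
  unfold basic_strike_alt
  norm_num
  refine String.toList_inj.mp ?_
  simp [String.toList_append]

theorem case4 (pos point : Int) (special : String)
    (hx : ((((PySem.Str.split? (PySem.Int.toStr point ++ "/" ++ special) "/").getD []).length == 1) = false)) :
    basic_strike pos 4 point special = basic_strike_alt pos 4 point special := by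
  have r0 : PySem.List.pyRange 0 4 1 = [0,1,2,3] := by decide
  rw [hstep4]; unfold write_multi_tiles; rw [r0]; simp only [List.foldl]
  rw [show ∀ (m x : String), wmt_step "___N" (m,["","","",x]) 0 = (m ++ ",", ["","","",x]) from fun _ _ => rfl]
  rw [show ∀ (m x : String), wmt_step "___N" (m,["","","",x]) 1 = (m ++ ",", ["","","",x]) from fun _ _ => rfl]
  rw [show ∀ (m x : String), wmt_step "___N" (m,["","","",x]) 2 = (m ++ ",", ["","","",x]) from fun _ _ => rfl]
  rw [tN4 _ _ hx]
  unfold basic_strike_alt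
  norm_num
  refine String.toList_inj.mp ?_
  simp [String.toList_append]

theorem case_else (pos line point : Int) (special : String)
    (e1 : (((1:Int) == line) = false)) (e2 : (((2:Int) == line) = false))
    (e3 : (((3:Int) == line) = false)) (e4 : (((4:Int) == line) = false)) :
    basic_strike pos line point special = basic_strike_alt pos line point special := by
  have r1 : PySem.List.pyRange 1 5 1 = [1,2,3,4] := by decide
  have r0 : PySem.List.pyRange 0 4 1 = [0,1,2,3] := by decide
  unfold basic_strike write_multi_tiles basic_strike_alt
  rw [r1, r0]
  simp only [List.foldl, e1, e2, e3, e4, Bool.false_eq_true, if_false]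
  rw [show ("" ++ "_" ++ "_" ++ "_" ++ "_" : String) = "____" from rfl,
      show (([] ++ [""] ++ [""] ++ [""] ++ [""]) : List String) = ["","","",""] from rfl]
  rw [show ∀ (m : String), wmt_step "____" (m,["","","",""]) 0 = (m ++ ",", ["","","",""]) from fun _ => rfl]
  rw [show ∀ (m : String), wmt_step "____" (m,["","","",""]) 1 = (m ++ ",", ["","","",""]) from fun _ => rfl]
  rw [show ∀ (m : String), wmt_step "____" (m,["","","",""]) 2 = (m ++ ",", ["","","",""]) from fun _ => rfl]
  rw [show ∀ (m : String), wmt_step "____" (m,["","","",""]) 3 = (m ++ ",", ["","","",""]) from fun _ => rfl]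
  have hne : ¬ (1 ≤ line ∧ line ≤ 4) := by
    simp only [beq_eq_false_iff_ne, ne_eq] at e1 e2 e3 e4
    omega
  rw [if_neg hne]
  refine String.toList_inj.mp ?_
  simp [String.toList_append]

-- ===== VERDICT (by name: the statement is the Claim_ definition above) =====
theorem basic_strike_spec : Claim_equal_basic_strike := by
  unfold Claim_equal_basic_strike Spec_basic_strike
  intro pos line point special _
  have hx : ((((PySem.Str.split? (PySem.Int.toStr point ++ "/" ++ special) "/").getD []).length == 1) = false) :=
    split_ne_one _ (by simp)
  by_cases h1 : line = 1
  · subst h1; exact case1 pos point special hx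
  by_cases h2 : line = 2
  · subst h2; exact case2 pos point special hx
  by_cases h3 : line = 3
  · subst h3; exact case3 pos point special hx
  by_cases h4 : line = 4
  · subst h4; exact case4 pos point special hx
  exact case_else pos line point special
    (by simp only [beq_eq_false_iff_ne, ne_eq]; omega)
    (by simp only [beq_eq_false_iff_ne, ne_eq]; omega)
    (by simp only [beq_eq_false_iff_ne, ne_eq]; omega)
    (by simp only [beq_eq_false_iff_ne, ne_eq]; omega)
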